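-- pv_equiv track=rewrite | github.com/dolphilia/reml | tooling/ci/collect-iterator-audit-metrics.py | prune_index_entries
-- ===== SOURCE A (Python) =====
-- from collections import defaultdict
-- from typing import Any, Dict, Iterable, List, Optional, Sequence, Set, Tuple
--
-- DEFAULT_RETENTION_POLICY: Dict[str, int] = {
--     "ci": 100,
--     "local": 30,
--     "tmp": 20,
--     "default": 50,
-- }
--
-- def _entry_profile(entry: Dict[str, Any]) -> str:
--     for key in ("profile", "store", "audit_store"):
--         value = entry.get(key)
--         if isinstance(value, str) and value:
--             return value
--     return "ci"
--
-- def _entry_target(entry: Dict[str, Any]) -> str: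
--     for key in ("target", "platform", "triple"):
--         value = entry.get(key)
--         if isinstance(value, str) and value:
--             return value
--     return "<unknown>"
--
-- def prune_index_entries(
--     entries: List[Dict[str, Any]], retention: Dict[str, int]
-- ) -> Tuple[List[Dict[str, Any]], List[Dict[str, Any]]]:
--     retain_default = retention.get("default", DEFAULT_RETENTION_POLICY["default"])
--     kept_reversed: List[Dict[str, Any]] = []
--     pruned: List[Dict[str, Any]] = []
--     counts: Dict[Tuple[str, str], int] = defaultdict(int)
--
--     for entry in reversed(entries):
--         profile = _entry_profile(entry)
--         target = _entry_target(entry)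
--         limit = retention.get(profile, retain_default)
--         key = (profile, target)
--         if limit <= 0:
--             pruned.append(entry)
--             continue
--         if counts[key] < limit:
--             counts[key] += 1
--             kept_reversed.append(entry)
--         else:
--             pruned.append(entry)
--
--     kept_reversed.reverse()
--     pruned.reverse()
--     return kept_reversed, pruned
-- ===== SOURCE B (Python) =====
-- from typing import Any, Dict, List, Tuple
--
-- DEFAULT_RETENTION_POLICY: Dict[str, int] = {
--     "ci": 100,
--     "local": 30,
--     "tmp": 20,
--     "default": 50,
-- }
--
-- def _entry_profile(entry: Dict[str, Any]) -> str:
--     for key in ("profile", "store", "audit_store"):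
--         value = entry.get(key)
--         if isinstance(value, str) and value:
--             return value
--     return "ci"
--
-- def _entry_target(entry: Dict[str, Any]) -> str:
--     for key in ("target", "platform", "triple"):
--         value = entry.get(key)
--         if isinstance(value, str) and value:
--             return value
--     return "<unknown>"
--
-- def prune_index_entries(
--     entries: List[Dict[str, Any]], retention: Dict[str, int]
-- ) -> Tuple[List[Dict[str, Any]], List[Dict[str, Any]]]:
--     retain_default = retention.get("default", DEFAULT_RETENTION_POLICY["default"])
--     # First pass: compute each entry's key once and count entries per key.
--     keys: List[Tuple[str, str]] = []
--     remaining: Dict[Tuple[str, str], int] = {}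
--     for entry in entries:
--         key = (_entry_profile(entry), _entry_target(entry))
--         keys.append(key)
--         remaining[key] = remaining.get(key, 0) + 1
--     # Second pass (forward): keep an entry iff its key has at most `limit`
--     # occurrences from here to the end; outputs come out in order directly.
--     kept: List[Dict[str, Any]] = []
--     pruned: List[Dict[str, Any]] = []
--     for entry, key in zip(entries, keys):
--         limit = retention.get(key[0], retain_default)
--         r = remaining[key]
--         if limit > 0 and r <= limit:
--             kept.append(entry)
--         else:
--             pruned.append(entry)
--         remaining[key] = r - 1
--     return kept, pruned
-- ===== Notes on version B (the rewrite author's own statement) =====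
-- stated objective: alternative
-- what changed: A makes one reversed pass with a kept-so-far counter dict and reverses both result lists; B counts key occurrences in a forward first pass (caching each entry's key), then a second forward pass keeps an entry iff at most limit occurrences of its key remain, emitting both lists in order with no reversals.
import Mathlib
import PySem

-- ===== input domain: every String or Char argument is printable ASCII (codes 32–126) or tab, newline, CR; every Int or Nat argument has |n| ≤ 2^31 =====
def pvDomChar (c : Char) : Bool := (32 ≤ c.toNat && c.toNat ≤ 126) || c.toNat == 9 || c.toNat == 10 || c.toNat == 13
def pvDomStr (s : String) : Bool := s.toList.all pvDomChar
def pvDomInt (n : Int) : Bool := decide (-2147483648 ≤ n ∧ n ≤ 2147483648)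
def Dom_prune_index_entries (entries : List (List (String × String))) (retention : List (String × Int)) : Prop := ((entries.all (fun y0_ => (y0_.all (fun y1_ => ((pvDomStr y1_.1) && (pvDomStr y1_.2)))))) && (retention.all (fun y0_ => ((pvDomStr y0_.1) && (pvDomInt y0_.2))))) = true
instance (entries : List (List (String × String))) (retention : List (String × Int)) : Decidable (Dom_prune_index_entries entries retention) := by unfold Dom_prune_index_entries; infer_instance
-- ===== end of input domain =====

-- B replaces A's single reversed pass with a count-table-then-forward-scan decomposition
-- (objective: alternative decomposition; entry keys are also computed once instead of per pass).

-- ===== PORT A =====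
-- shared helpers: the Python `_entry_profile` / `_entry_target` loops over candidate keys
-- (every value is a String here, so `isinstance(value, str) and value` = value nonempty)
def pvFirstStr (e : PySem.Dict String String) : List String → Option String
  | [] => none
  | k :: ks =>
    match PySem.Dict.get? e k with
    | some v => if v ≠ "" then some v else pvFirstStr e ks
    | none => pvFirstStr e ks

def entryProfile (e : List (String × String)) : String :=
  (pvFirstStr (PySem.Dict.ofList e) ["profile", "store", "audit_store"]).getD "ci"

def entryTarget (e : List (String × String)) : String :=
  (pvFirstStr (PySem.Dict.ofList e) ["target", "platform", "triple"]).getD "<unknown>"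

def prune_index_entries (entries : List (List (String × String))) (retention : List (String × Int)) : (List (List (String × String))) × (List (List (String × String))) :=
  let ret := PySem.Dict.ofList retention
  let retain_default := PySem.Dict.getD ret "default" 50
  let s := entries.reverse.foldl
    (fun (st : PySem.Dict (String × String) Int × List (List (String × String)) × List (List (String × String))) entry =>
      let profile := entryProfile entry
      let target := entryTarget entry
      let limit := PySem.Dict.getD ret profile retain_default
      let key := (profile, target)
      if limit ≤ 0 then (st.1, st.2.1, st.2.2 ++ [entry])
      else if PySem.Dict.getD st.1 key 0 < limit then
        (PySem.Dict.insert st.1 key (PySem.Dict.getD st.1 key 0 + 1), st.2.1 ++ [entry], st.2.2)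
      else (st.1, st.2.1, st.2.2 ++ [entry]))
    (PySem.Dict.empty, [], [])
  (s.2.1.reverse, s.2.2.reverse)

-- ===== PORT B =====
def prune_index_entries_alt (entries : List (List (String × String))) (retention : List (String × Int)) : (List (List (String × String))) × (List (List (String × String))) :=
  let ret := PySem.Dict.ofList retention
  let retain_default := PySem.Dict.getD ret "default" 50
  -- first pass: per-entry keys and occurrence count per key
  let tk := entries.foldl
    (fun (st : List (String × String) × PySem.Dict (String × String) Int) entry =>
      let key := (entryProfile entry, entryTarget entry)
      (st.1 ++ [key], PySem.Dict.insert st.2 key (PySem.Dict.getD st.2 key 0 + 1)))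
    ([], PySem.Dict.empty)
  -- second pass (forward): keep iff the key occurs at most `limit` more times from here on
  -- (remaining[key] is always present in Python; getD 0 is exact since the key was counted)
  let s := (entries.zip tk.1).foldl
    (fun (st : PySem.Dict (String × String) Int × List (List (String × String)) × List (List (String × String))) ek =>
      let limit := PySem.Dict.getD ret ek.2.1 retain_default
      let r := PySem.Dict.getD st.1 ek.2 0
      let kp := if 0 < limit ∧ r ≤ limit then (st.2.1 ++ [ek.1], st.2.2) else (st.2.1, st.2.2 ++ [ek.1])
      (PySem.Dict.insert st.1 ek.2 (r - 1), kp.1, kp.2))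
    (tk.2, [], [])
  (s.2.1, s.2.2)

-- ===== PRECONDITION & SPEC =====
def Spec_prune_index_entries (entries : List (List (String × String))) (retention : List (String × Int)) (out : (List (List (String × String))) × (List (List (String × String)))) : Prop := out = prune_index_entries_alt entries retention
instance (entries : List (List (String × String))) (retention : List (String × Int)) (out : (List (List (String × String))) × (List (List (String × String)))) : Decidable (Spec_prune_index_entries entries retention out) := by unfold Spec_prune_index_entries; infer_instance

-- ===== CLAIM (what is proved, stated in full; the proofs are below) =====
def Claim_equal_prune_index_entries : Prop := ∀ (entries : List (List (String × String))) (retention : List (String × Int)), Dom_prune_index_entries entries retention → Spec_prune_index_entries entries retention (prune_index_entries entries retention)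

-- ===== LEMMAS AND PROOFS =====

-- the (profile, target) key of an entry
def keyOf (e : List (String × String)) : String × String := (entryProfile e, entryTarget e)

-- number of entries in l whose key is k
def cnt (k : String × String) (l : List (List (String × String))) : Nat :=
  (l.filter (fun e => keyOf e = k)).length

-- reference recursion: an entry is kept iff its limit is positive and fewer than
-- `limit` same-key entries follow it
def specRef (ret : PySem.Dict String Int) (rd : Int) : List (List (String × String)) → (List (List (String × String))) × (List (List (String × String)))
  | [] => ([], [])
  | e :: rest =>
    let s := specRef ret rd rest
    let limit := PySem.Dict.getD ret (keyOf e).1 rd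
    if 0 < limit ∧ (cnt (keyOf e) rest : Int) < limit then (e :: s.1, s.2) else (s.1, e :: s.2)

theorem cnt_cons (k : String × String) (e : List (String × String)) (l : List (List (String × String))) :
    cnt k (e :: l) = (if keyOf e = k then 1 else 0) + cnt k l := by
  simp only [cnt, List.filter]
  split_ifs with h <;> simp_all <;> omega

-- ---- A side ----

def stepA (ret : PySem.Dict String Int) (rd : Int)
    (st : PySem.Dict (String × String) Int × List (List (String × String)) × List (List (String × String)))
    (entry : List (String × String)) :
    PySem.Dict (String × String) Int × List (List (String × String)) × List (List (String × String)) :=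
  if PySem.Dict.getD ret (entryProfile entry) rd ≤ 0 then (st.1, st.2.1, st.2.2 ++ [entry])
  else if PySem.Dict.getD st.1 (entryProfile entry, entryTarget entry) 0 < PySem.Dict.getD ret (entryProfile entry) rd then
    (PySem.Dict.insert st.1 (entryProfile entry, entryTarget entry)
      (PySem.Dict.getD st.1 (entryProfile entry, entryTarget entry) 0 + 1), st.2.1 ++ [entry], st.2.2)
  else (st.1, st.2.1, st.2.2 ++ [entry])

theorem specRef_cons (ret : PySem.Dict String Int) (rd : Int) (e : List (String × String))
    (rest : List (List (String × String))) :
    specRef ret rd (e :: rest) =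
      if 0 < PySem.Dict.getD ret (keyOf e).1 rd ∧ (cnt (keyOf e) rest : Int) < PySem.Dict.getD ret (keyOf e).1 rd
      then (e :: (specRef ret rd rest).1, (specRef ret rd rest).2)
      else ((specRef ret rd rest).1, e :: (specRef ret rd rest).2) := rfl

theorem a_inv (ret : PySem.Dict String Int) (rd : Int) (l : List (List (String × String))) :
    (∀ k : String × String,
      (l.foldr (fun e st => stepA ret rd st e) (PySem.Dict.empty, [], [])).1.getD k 0 =
        if PySem.Dict.getD ret k.1 rd ≤ 0 then 0
        else min (PySem.Dict.getD ret k.1 rd) (cnt k l : Int)) ∧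
    (l.foldr (fun e st => stepA ret rd st e) (PySem.Dict.empty, [], [])).2.1 = (specRef ret rd l).1.reverse ∧
    (l.foldr (fun e st => stepA ret rd st e) (PySem.Dict.empty, [], [])).2.2 = (specRef ret rd l).2.reverse := by
  induction l with
  | nil =>
    refine ⟨fun k => ?_, rfl, rfl⟩
    simp [cnt, PySem.Dict.getD_empty]
    omega
  | cons e rest ih =>
    obtain ⟨ihc, ihk, ihp⟩ := ih
    simp only [List.foldr_cons]
    have hkey : (keyOf e).1 = entryProfile e := rfl
    have hkey2 : keyOf e = (entryProfile e, entryTarget e) := rfl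
    have hc := ihc (keyOf e)
    rw [hkey] at hc
    by_cases h0 : PySem.Dict.getD ret (entryProfile e) rd ≤ 0
    · rw [show stepA ret rd (rest.foldr (fun e st => stepA ret rd st e) (PySem.Dict.empty, [], [])) e
          = ((rest.foldr (fun e st => stepA ret rd st e) (PySem.Dict.empty, [], [])).1,
             (rest.foldr (fun e st => stepA ret rd st e) (PySem.Dict.empty, [], [])).2.1,
             (rest.foldr (fun e st => stepA ret rd st e) (PySem.Dict.empty, [], [])).2.2 ++ [e])
          from by rw [stepA, if_pos h0]]
      refine ⟨fun k => ?_, ?_, ?_⟩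
      · rw [ihc k, cnt_cons]
        by_cases hk : keyOf e = k
        · rw [← hk, hkey, if_pos h0, if_pos h0]
        · simp [hk]
      · rw [specRef_cons, if_neg (by rw [hkey]; rintro ⟨h1, -⟩; omega)]
        simpa using ihk
      · rw [specRef_cons, if_neg (by rw [hkey]; rintro ⟨h1, -⟩; omega)]
        simpa using ihp
    · rw [not_le] at h0
      rw [if_neg (not_le.mpr h0)] at hc
      by_cases hlt : (cnt (keyOf e) rest : Int) < PySem.Dict.getD ret (entryProfile e) rd
      · -- kept
        have hmin : min (PySem.Dict.getD ret (entryProfile e) rd) (cnt (keyOf e) rest : Int)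
            = (cnt (keyOf e) rest : Int) := by omega
        rw [show stepA ret rd (rest.foldr (fun e st => stepA ret rd st e) (PySem.Dict.empty, [], [])) e
            = (PySem.Dict.insert (rest.foldr (fun e st => stepA ret rd st e) (PySem.Dict.empty, [], [])).1
                (entryProfile e, entryTarget e)
                (PySem.Dict.getD (rest.foldr (fun e st => stepA ret rd st e) (PySem.Dict.empty, [], [])).1
                  (entryProfile e, entryTarget e) 0 + 1),
               (rest.foldr (fun e st => stepA ret rd st e) (PySem.Dict.empty, [], [])).2.1 ++ [e],
               (rest.foldr (fun e st => stepA ret rd st e) (PySem.Dict.empty, [], [])).2.2)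
            from by
              rw [stepA, if_neg (not_le.mpr h0), if_pos (by rw [← hkey2, hc, hmin]; exact hlt)]]
        refine ⟨fun k => ?_, ?_, ?_⟩
        · rw [PySem.Dict.getD_insert, cnt_cons]
          by_cases hk : k = (entryProfile e, entryTarget e)
          · rw [if_pos hk, hk, ← hkey2, hc, hmin, hkey, if_neg (not_le.mpr h0)]
            simp only [if_pos rfl]
            push_cast
            omega
          · rw [if_neg hk, ihc k,
              if_neg (show ¬ keyOf e = k from fun h => hk (by rw [← h, hkey2]))]
            simp
        · rw [specRef_cons, if_pos (by rw [hkey]; exact ⟨h0, hlt⟩)]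
          simp [ihk]
        · rw [specRef_cons, if_pos (by rw [hkey]; exact ⟨h0, hlt⟩)]
          simpa using ihp
      · -- at limit: pruned
        have hmin : min (PySem.Dict.getD ret (entryProfile e) rd) (cnt (keyOf e) rest : Int)
            = PySem.Dict.getD ret (entryProfile e) rd := by omega
        rw [show stepA ret rd (rest.foldr (fun e st => stepA ret rd st e) (PySem.Dict.empty, [], [])) e
            = ((rest.foldr (fun e st => stepA ret rd st e) (PySem.Dict.empty, [], [])).1,
               (rest.foldr (fun e st => stepA ret rd st e) (PySem.Dict.empty, [], [])).2.1,
               (rest.foldr (fun e st => stepA ret rd st e) (PySem.Dict.empty, [], [])).2.2 ++ [e])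
            from by
              rw [stepA, if_neg (not_le.mpr h0), if_neg (by rw [← hkey2, hc, hmin]; omega)]]
        refine ⟨fun k => ?_, ?_, ?_⟩
        · rw [ihc k, cnt_cons]
          by_cases hk : keyOf e = k
          · rw [← hk, hkey, if_neg (not_le.mpr h0), if_neg (not_le.mpr h0)]
            simp only [if_pos rfl]
            push_cast
            omega
          · simp [hk]
        · rw [specRef_cons, if_neg (by rw [hkey]; rintro ⟨-, h2⟩; omega)]
          simpa using ihk
        · rw [specRef_cons, if_neg (by rw [hkey]; rintro ⟨-, h2⟩; omega)]
          simp [ihp]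

theorem a_eq_spec (entries : List (List (String × String))) (retention : List (String × Int)) :
    prune_index_entries entries retention =
      specRef (PySem.Dict.ofList retention)
        (PySem.Dict.getD (PySem.Dict.ofList retention) "default" 50) entries := by
  obtain ⟨-, hk, hp⟩ := a_inv (PySem.Dict.ofList retention)
    (PySem.Dict.getD (PySem.Dict.ofList retention) "default" 50) entries
  have key : prune_index_entries entries retention
      = ((entries.foldr (fun e st => stepA (PySem.Dict.ofList retention)
            (PySem.Dict.getD (PySem.Dict.ofList retention) "default" 50) st e)
            (PySem.Dict.empty, [], [])).2.1.reverse,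
         (entries.foldr (fun e st => stepA (PySem.Dict.ofList retention)
            (PySem.Dict.getD (PySem.Dict.ofList retention) "default" 50) st e)
            (PySem.Dict.empty, [], [])).2.2.reverse) := by
    show ((entries.reverse.foldl (fun st e => stepA (PySem.Dict.ofList retention)
            (PySem.Dict.getD (PySem.Dict.ofList retention) "default" 50) st e)
            (PySem.Dict.empty, [], [])).2.1.reverse,
          (entries.reverse.foldl (fun st e => stepA (PySem.Dict.ofList retention)
            (PySem.Dict.getD (PySem.Dict.ofList retention) "default" 50) st e)
            (PySem.Dict.empty, [], [])).2.2.reverse) = _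
    rw [List.foldl_reverse]
  rw [key, hk, hp]
  simp

-- ---- B side ----

theorem b_pass1 (l : List (List (String × String))) (acc : List (String × String))
    (d : PySem.Dict (String × String) Int) :
    (l.foldl (fun st entry =>
        let key := (entryProfile entry, entryTarget entry)
        (st.1 ++ [key], PySem.Dict.insert st.2 key (PySem.Dict.getD st.2 key 0 + 1))) (acc, d)).1
      = acc ++ l.map keyOf ∧
    ∀ k : String × String,
    (l.foldl (fun st entry =>
        let key := (entryProfile entry, entryTarget entry)
        (st.1 ++ [key], PySem.Dict.insert st.2 key (PySem.Dict.getD st.2 key 0 + 1))) (acc, d)).2.getD k 0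
      = d.getD k 0 + (cnt k l : Int) := by
  induction l generalizing acc d with
  | nil => simp [cnt]
  | cons e rest ih =>
    simp only [List.foldl_cons]
    obtain ⟨ih1, ih2⟩ := ih (acc ++ [(entryProfile e, entryTarget e)])
      (PySem.Dict.insert d (entryProfile e, entryTarget e)
        (PySem.Dict.getD d (entryProfile e, entryTarget e) 0 + 1))
    refine ⟨?_, fun k => ?_⟩
    · simp only [] at ih1 ⊢; rw [ih1]; simp [keyOf]
    · simp only [] at ih2 ⊢
      rw [ih2 k, PySem.Dict.getD_insert, cnt_cons]
      by_cases hk : k = (entryProfile e, entryTarget e)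
      · subst hk; simp [keyOf]; push_cast; ring
      · rw [if_neg hk, if_neg (show ¬ keyOf e = k from fun h => hk (by simpa [keyOf] using h.symm))]
        push_cast; ring

theorem b_pass2 (ret : PySem.Dict String Int) (rd : Int) (l : List (List (String × String)))
    (R : PySem.Dict (String × String) Int)
    (hR : ∀ k : String × String, R.getD k 0 = (cnt k l : Int))
    (k0 p0 : List (List (String × String))) :
    ((l.zip (l.map keyOf)).foldl (fun st ek =>
        let limit := PySem.Dict.getD ret ek.2.1 rd
        let r := PySem.Dict.getD st.1 ek.2 0
        let kp := if 0 < limit ∧ r ≤ limit then (st.2.1 ++ [ek.1], st.2.2) else (st.2.1, st.2.2 ++ [ek.1])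
        (PySem.Dict.insert st.1 ek.2 (r - 1), kp.1, kp.2)) (R, k0, p0)).2
      = (k0 ++ (specRef ret rd l).1, p0 ++ (specRef ret rd l).2) := by
  induction l generalizing R k0 p0 with
  | nil => simp [specRef]
  | cons e rest ih =>
    simp only [List.map_cons, List.zip_cons_cons, List.foldl_cons]
    have hr : PySem.Dict.getD R (keyOf e) 0 = (cnt (keyOf e) (e :: rest) : Int) := hR (keyOf e)
    have hcond : (0 < PySem.Dict.getD ret (keyOf e).1 rd ∧
        PySem.Dict.getD R (keyOf e) 0 ≤ PySem.Dict.getD ret (keyOf e).1 rd) ↔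
        (0 < PySem.Dict.getD ret (keyOf e).1 rd ∧
        (cnt (keyOf e) rest : Int) < PySem.Dict.getD ret (keyOf e).1 rd) := by
      rw [hr, cnt_cons]; simp only [if_pos rfl]
      constructor <;> (rintro ⟨h1, h2⟩; exact ⟨h1, by push_cast at h2 ⊢; omega⟩)
    have hR' : ∀ k : String × String,
        (PySem.Dict.insert R (keyOf e) (PySem.Dict.getD R (keyOf e) 0 - 1)).getD k 0 = (cnt k rest : Int) := by
      intro k
      rw [PySem.Dict.getD_insert]
      by_cases hk : k = keyOf e
      · subst hk; rw [if_pos rfl, hr, cnt_cons]; simp only [if_pos rfl]; push_cast; ring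
      · rw [if_neg hk, hR k, cnt_cons, if_neg (fun h => hk h.symm)]; push_cast; ring
    by_cases hc : 0 < PySem.Dict.getD ret (keyOf e).1 rd ∧
        (cnt (keyOf e) rest : Int) < PySem.Dict.getD ret (keyOf e).1 rd
    · simp only [if_pos (hcond.mpr hc)]
      rw [ih _ hR' (k0 ++ [e]) p0]
      simp [specRef, hc]
    · simp only [if_neg (fun h => hc (hcond.mp h))]
      rw [ih _ hR' k0 (p0 ++ [e])]
      simp [specRef, hc]

theorem b_eq_spec (entries : List (List (String × String))) (retention : List (String × Int)) :
    prune_index_entries_alt entries retention =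
      specRef (PySem.Dict.ofList retention)
        (PySem.Dict.getD (PySem.Dict.ofList retention) "default" 50) entries := by
  unfold prune_index_entries_alt
  obtain ⟨h1, h2⟩ := b_pass1 entries [] PySem.Dict.empty
  simp only [] at h1 h2 ⊢
  rw [h1]
  simp only [List.nil_append]
  have hR : ∀ k : String × String,
      (entries.foldl (fun st entry =>
        let key := (entryProfile entry, entryTarget entry)
        (st.1 ++ [key], PySem.Dict.insert st.2 key (PySem.Dict.getD st.2 key 0 + 1))) ([], PySem.Dict.empty)).2.getD k 0
      = (cnt k entries : Int) := by
    intro k; rw [h2 k, PySem.Dict.getD_empty]; ring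
  have := b_pass2 (PySem.Dict.ofList retention)
    (PySem.Dict.getD (PySem.Dict.ofList retention) "default" 50) entries _ hR [] []
  simp only [List.nil_append] at this
  rw [Prod.ext_iff] at this ⊢
  exact this

-- ===== VERDICT (by name: the statement is the Claim_ definition above) =====
theorem prune_index_entries_spec : Claim_equal_prune_index_entries := by
  intro entries retention _
  unfold Spec_prune_index_entries
  rw [a_eq_spec, b_eq_spec]
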